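-- pv_equiv track=rewrite | github.com/johnnyflame/advent-of-code-2021 | src/day15.py | expand_tile_row
-- ===== SOURCE A (Python) =====
-- def expand_tile_row(grid):
--     increments = []
--     increments.append(grid)
--
--     for i in range(1, 5):
--         post_increment_grid = []
--         for row in grid:
--             post_increment_grid.append(
--                 [(val + i) % 9 if (val + i) > 9 else (val + i) for val in row]
--             )
--         increments.append(post_increment_grid)
--
--     return [a + b + c + d + e for a, b, c, d, e in zip(*increments)]
-- ===== SOURCE B (Python) =====
-- def expand_tile_row(grid):
--     return [
--         row + [(v + i) % 9 if (v + i) > 9 else (v + i)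
--                for i in range(1, 5) for v in row]
--         for row in grid
--     ]
-- ===== Notes on version B (the rewrite author's own statement) =====
-- stated objective: simpler
-- what changed: B drops the five intermediate tile-grids and the zip-transpose, building each expanded 5-wide row directly in one row-major pass (row itself plus the four wrapped copies).
import Mathlib
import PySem

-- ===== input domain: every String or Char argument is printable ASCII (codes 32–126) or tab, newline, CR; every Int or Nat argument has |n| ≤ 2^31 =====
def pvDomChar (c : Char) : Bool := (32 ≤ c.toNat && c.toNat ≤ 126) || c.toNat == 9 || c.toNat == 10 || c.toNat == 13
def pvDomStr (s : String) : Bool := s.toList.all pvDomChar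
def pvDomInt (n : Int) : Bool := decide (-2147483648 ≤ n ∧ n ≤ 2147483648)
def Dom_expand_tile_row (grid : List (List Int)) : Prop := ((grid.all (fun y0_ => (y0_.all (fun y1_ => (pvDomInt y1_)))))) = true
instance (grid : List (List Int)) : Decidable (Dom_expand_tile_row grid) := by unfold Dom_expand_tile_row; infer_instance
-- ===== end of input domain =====

-- B builds each expanded 5-wide row directly in one row-major pass instead of A's five tile-grids plus zip-transpose (objective: simpler).

-- ===== PORT A =====
-- the wrapped value (val + i) % 9 if (val + i) > 9 else (val + i); Python `%` = PySem.Int.mod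
def pvWrap (i v : Int) : Int := if v + i > 9 then PySem.Int.mod (v + i) 9 else v + i

-- increments = [grid]; then the range(1,5) loop appends one whole incremented grid per i
def pvIncrements (grid : List (List Int)) : List (List (List Int)) :=
  (PySem.List.pyRange 1 5 1).foldl
    (fun acc i => acc ++ [grid.map (fun row => row.map (fun val => pvWrap i val))])
    [grid]

-- zip(*increments) over the five grids, concatenating each quintuple of rows (a + b + c + d + e)
def pvZip5 : List (List Int) → List (List Int) → List (List Int) → List (List Int) → List (List Int) → List (List Int)
  | a :: as, b :: bs, c :: cs, d :: ds, e :: es => (a ++ b ++ c ++ d ++ e) :: pvZip5 as bs cs ds es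
  | _, _, _, _, _ => []

def expand_tile_row (grid : List (List Int)) : List (List Int) :=
  match pvIncrements grid with
  | [a, b, c, d, e] => pvZip5 a b c d e
  | _ => []

-- ===== PORT B =====
def expand_tile_row_alt (grid : List (List Int)) : List (List Int) :=
  grid.map (fun row =>
    row ++ (PySem.List.pyRange 1 5 1).flatMap (fun i => row.map (fun v => pvWrap i v)))

-- ===== PRECONDITION & SPEC =====
def Spec_expand_tile_row (grid : List (List Int)) (out : List (List Int)) : Prop := out = expand_tile_row_alt grid
instance (grid : List (List Int)) (out : List (List Int)) : Decidable (Spec_expand_tile_row grid out) := by unfold Spec_expand_tile_row; infer_instance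

-- ===== CLAIM (what is proved, stated in full; the proofs are below) =====
def Claim_equal_expand_tile_row : Prop := ∀ (grid : List (List Int)), Dom_expand_tile_row grid → Spec_expand_tile_row grid (expand_tile_row grid)

-- ===== LEMMAS AND PROOFS =====

theorem pvZip5_map (g : List (List Int)) (f1 f2 f3 f4 : List Int → List Int) :
    pvZip5 g (g.map f1) (g.map f2) (g.map f3) (g.map f4)
      = g.map (fun r => r ++ f1 r ++ f2 r ++ f3 r ++ f4 r) := by
  induction g with
  | nil => rfl
  | cons r rs ih => simp [pvZip5, ih]

-- ===== VERDICT (by name: the statement is the Claim_ definition above) =====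
theorem expand_tile_row_spec : Claim_equal_expand_tile_row := by
  intro grid _
  unfold Spec_expand_tile_row expand_tile_row expand_tile_row_alt pvIncrements
  rw [show PySem.List.pyRange 1 5 1 = [1, 2, 3, 4] from rfl]
  simp only [List.foldl, List.flatMap_cons, List.flatMap_nil, List.append_nil,
    List.cons_append, List.nil_append, List.append_assoc]
  rw [pvZip5_map]
  simp only [List.append_assoc]
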